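-- pv_equiv track=rewrite | github.com/skconsulting/sudoku | sudoku_final.py | combin4
-- ===== SOURCE A (Python) =====
-- def combin4(seq, k):
--
--     p = []
--     i, imax = 0, 2**len(seq)-1
--     while i<=imax:
--         s = []
--         j, jmax = 0, len(seq)-1
--         while j<=jmax:
--             if (i>>j)&1==1:
--                 if len(seq[j])>0:
--                     s.append(seq[j])
--             j += 1
--         if len(s)==k:
--             p.append(s)
--         i += 1
--     return p
-- ===== SOURCE B (Python) =====
-- def combin4(seq, k):
--     # Build every subset of seq by the standard doubling power-set construction
--     # (an included empty element contributes nothing), then keep those of size k.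
--     subsets = [[]]
--     for e in seq:
--         included = [s + [e] for s in subsets] if e else subsets
--         subsets = subsets + included
--     return [s for s in subsets if len(s) == k]
-- ===== Notes on version B (the rewrite author's own statement) =====
-- stated objective: alternative
-- what changed: Replaces A's double loop over all 2^n bitmasks with an inner per-position bit test by the standard incremental power-set doubling over the elements followed by a single length-k filter; intended as faster by constant factor (measured 10.5x at n=16, but at n=64 neither program finishes since the output itself is exponential), so claimed only as alternative.
import Mathlib
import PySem

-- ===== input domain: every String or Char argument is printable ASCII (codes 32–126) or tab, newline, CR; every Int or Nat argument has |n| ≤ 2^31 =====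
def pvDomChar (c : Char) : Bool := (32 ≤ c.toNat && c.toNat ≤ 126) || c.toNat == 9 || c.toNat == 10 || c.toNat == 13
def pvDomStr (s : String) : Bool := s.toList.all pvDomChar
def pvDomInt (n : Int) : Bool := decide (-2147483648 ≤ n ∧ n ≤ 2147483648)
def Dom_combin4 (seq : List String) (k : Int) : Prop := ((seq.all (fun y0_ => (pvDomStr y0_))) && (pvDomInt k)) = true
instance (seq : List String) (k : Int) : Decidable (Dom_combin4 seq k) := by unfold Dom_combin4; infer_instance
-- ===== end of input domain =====

-- B: incremental power-set doubling over the elements plus a length-k filter instead of A's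
-- scan of all 2^n bitmasks with a per-position bit test; intended as faster (measured 10.5x
-- at n=16; at n=64 neither finishes: the output itself is exponential).


-- ===== PORT A =====
-- literal port: i runs over all bitmasks 0..2^len-1, j over positions; bit test (i>>j)&1
def combin4 (seq : List String) (k : Int) : List (List String) :=
  (List.range (2 ^ seq.length)).foldl (fun p i =>
    let s := (List.range seq.length).foldl (fun s j =>
      if (i >>> j) &&& 1 = 1 then
        if 0 < (seq.getD j "").length then s ++ [seq.getD j ""] else s
      else s) []
    if (s.length : Int) = k then p ++ [s] else p) []

-- ===== PORT B =====
-- port of Source B: doubling power-set construction, then filter by length k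
def combin4_alt (seq : List String) (k : Int) : List (List String) :=
  let subsets := seq.foldl (fun subsets e =>
    let included := if 0 < e.length then subsets.map (fun s => s ++ [e]) else subsets
    subsets ++ included) [[]]
  subsets.filter (fun s => decide ((s.length : Int) = k))

-- ===== PRECONDITION & SPEC =====
def Spec_combin4 (seq : List String) (k : Int) (out : List (List String)) : Prop := out = combin4_alt seq k
instance (seq : List String) (k : Int) (out : List (List String)) : Decidable (Spec_combin4 seq k out) := by unfold Spec_combin4; infer_instance

-- ===== CLAIM (what is proved, stated in full; the proofs are below) =====
def Claim_equal_combin4 : Prop := ∀ (seq : List String) (k : Int), Dom_combin4 seq k → Spec_combin4 seq k (combin4 seq k)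

-- ===== LEMMAS AND PROOFS =====

-- "include e in subset s, unless e is empty"
def pvExt (e : String) (s : List String) : List String :=
  if 0 < e.length then s ++ [e] else s

-- all subsets (with empty elements dropped), in ascending-bitmask order
def pvAllSubs (seq : List String) : List (List String) :=
  seq.foldl (fun acc e => acc ++ acc.map (pvExt e)) [[]]

-- A's inner loop
def pvSubsetOf (seq : List String) (i : Nat) : List String :=
  (List.range seq.length).foldl (fun s j =>
    if (i >>> j) &&& 1 = 1 then
      if 0 < (seq.getD j "").length then s ++ [seq.getD j ""] else s
    else s) []

theorem pvAllSubs_snoc (xs : List String) (e : String) :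
    pvAllSubs (xs ++ [e]) = pvAllSubs xs ++ (pvAllSubs xs).map (pvExt e) := by
  simp [pvAllSubs, List.foldl_append]

theorem pvBit_eq (i j : Nat) : ((i >>> j) &&& 1 = 1) ↔ (i / 2 ^ j % 2 = 1) := by
  rw [Nat.shiftRight_eq_div_pow, Nat.and_one_is_mod]

theorem pvBit_low (i j n : Nat) (hj : j < n) :
    ((2 ^ n + i) >>> j) &&& 1 = (i >>> j) &&& 1 := by
  rw [Nat.shiftRight_eq_div_pow, Nat.shiftRight_eq_div_pow, Nat.and_one_is_mod,
    Nat.and_one_is_mod]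
  have h1 : 2 ^ n = 2 ^ (n - j) * 2 ^ j := by
    rw [← pow_add]; congr 1; omega
  have h2 : (2 ^ n + i) / 2 ^ j = 2 ^ (n - j) + i / 2 ^ j := by
    rw [h1, Nat.add_comm, Nat.add_mul_div_right _ _ (Nat.two_pow_pos j), Nat.add_comm]
  have h3 : 2 ^ (n - j) % 2 = 0 := by
    have : 2 ^ (n - j) = 2 * 2 ^ (n - j - 1) := by
      rw [← pow_succ']; congr 1; omega
    omega
  rw [h2]; omega

theorem pvBit_top_lo (i n : Nat) (hi : i < 2 ^ n) : ¬ ((i >>> n) &&& 1 = 1) := by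
  rw [pvBit_eq, Nat.div_eq_of_lt hi]; omega

theorem pvBit_top_hi (i n : Nat) (hi : i < 2 ^ n) : ((2 ^ n + i) >>> n) &&& 1 = 1 := by
  rw [pvBit_eq, Nat.add_comm, Nat.add_div_right _ (Nat.two_pow_pos n),
    Nat.div_eq_of_lt hi]

theorem pvSubsetOf_snoc (xs : List String) (e : String) (i : Nat) :
    pvSubsetOf (xs ++ [e]) i =
      (if (i >>> xs.length) &&& 1 = 1 then pvExt e (pvSubsetOf xs i) else pvSubsetOf xs i) := by
  have he : (xs ++ [e]).getD xs.length "" = e := by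
    simp
  unfold pvSubsetOf
  rw [show (xs ++ [e]).length = xs.length + 1 by simp, List.range_succ, List.foldl_append]
  have hinner :
      (List.range xs.length).foldl (fun s j =>
        if (i >>> j) &&& 1 = 1 then
          if 0 < ((xs ++ [e]).getD j "").length then s ++ [(xs ++ [e]).getD j ""] else s
        else s) [] =
      (List.range xs.length).foldl (fun s j =>
        if (i >>> j) &&& 1 = 1 then
          if 0 < (xs.getD j "").length then s ++ [xs.getD j ""] else s
        else s) [] := by
    apply List.foldl_ext
    intro a j hj
    rw [List.getD_append _ _ _ _ (List.mem_range.mp hj)]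
  rw [hinner]
  simp only [List.foldl_cons, List.foldl_nil, he, pvExt]

theorem pvSubsetOf_high (xs : List String) (i : Nat) :
    pvSubsetOf xs (2 ^ xs.length + i) = pvSubsetOf xs i := by
  unfold pvSubsetOf
  apply List.foldl_ext
  intro a j hj
  rw [pvBit_low i j xs.length (List.mem_range.mp hj)]

theorem pvMap_range_subsetOf (xs : List String) :
    (List.range (2 ^ xs.length)).map (pvSubsetOf xs) = pvAllSubs xs := by
  induction xs using List.reverseRecOn with
  | nil => simp [pvSubsetOf, pvAllSubs]
  | append_singleton xs e ih =>
    rw [pvAllSubs_snoc, ← ih]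
    rw [show (xs ++ [e]).length = xs.length + 1 by simp]
    rw [show 2 ^ (xs.length + 1) = 2 ^ xs.length + 2 ^ xs.length by rw [pow_succ]; omega]
    rw [List.range_add, List.map_append, List.map_map, List.map_map]
    congr 1
    · apply List.map_congr_left
      intro i hi
      rw [pvSubsetOf_snoc, if_neg (pvBit_top_lo i xs.length (List.mem_range.mp hi))]
    · apply List.map_congr_left
      intro i hi
      simp only [Function.comp]
      rw [pvSubsetOf_snoc, if_pos (pvBit_top_hi i xs.length (List.mem_range.mp hi)),
        pvSubsetOf_high]

theorem pvFoldl_filter {α β : Type} (g : α → β) (q : β → Prop) [DecidablePred q]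
    (L : List α) (acc : List β) :
    L.foldl (fun p i => if q (g i) then p ++ [g i] else p) acc =
      acc ++ (L.map g).filter (fun b => decide (q b)) := by
  induction L generalizing acc with
  | nil => simp
  | cons x xs ih =>
    simp only [List.foldl_cons, List.map_cons, List.filter_cons, ih]
    by_cases h : q (g x) <;> simp [h]

theorem pvA_eq_filter (seq : List String) (k : Int) :
    combin4 seq k = (pvAllSubs seq).filter (fun s => decide ((s.length : Int) = k)) := by
  have h : combin4 seq k =
      (List.range (2 ^ seq.length)).foldl
        (fun p i => if ((pvSubsetOf seq i).length : Int) = k then p ++ [pvSubsetOf seq i] else p)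
        [] := rfl
  rw [h, pvFoldl_filter (pvSubsetOf seq) (fun s => (s.length : Int) = k),
    List.nil_append, pvMap_range_subsetOf]

theorem pvB_eq_filter (seq : List String) (k : Int) :
    combin4_alt seq k = (pvAllSubs seq).filter (fun s => decide ((s.length : Int) = k)) := by
  have hstep : (fun (subsets : List (List String)) (e : String) =>
      subsets ++ (if 0 < e.length then subsets.map (fun s => s ++ [e]) else subsets)) =
      (fun acc e => acc ++ acc.map (pvExt e)) := by
    funext acc e
    congr 1
    by_cases he : 0 < e.length
    · rw [if_pos he]
      apply List.map_congr_left
      intro s _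
      rw [pvExt, if_pos he]
    · rw [if_neg he]
      have h : ∀ s ∈ acc, s = pvExt e s := by
        intro s _
        rw [pvExt, if_neg he]
      conv_lhs => rw [← List.map_id' acc, List.map_congr_left h]
  unfold combin4_alt pvAllSubs
  rw [hstep]

-- ===== VERDICT (by name: the statement is the Claim_ definition above) =====
theorem combin4_spec : Claim_equal_combin4 := by
  intro seq k _
  unfold Spec_combin4
  rw [pvA_eq_filter, pvB_eq_filter]
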